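/-
  THE SEGMENTS OF codebook_decode_scalar_raw (design/CONTRACTS.md entry 53, "Segments of codebook_decode_scalar_raw"; units
  codebook_decode_scalar_raw.1 … .4 and .COMPOSITION of design/units.tsv). The function's `Spec` is Vorbis/Spec/Codebook.lean's
  `codebook_decode_scalar_raw.spec`; here: one assertion per cut point (`ScalarRaw.At…`) and one CLAIM per segment.

      .1  entry        → AtBinary (L.….cut2 = 10D62EH) ∨ AtLinear (cut7 = 10D8A5H) ∨ AtExit (cut5 = 10D775H, r12d = −1)
      .2  AtBinary     → AtExit       binary search (BS), translation (K4c), length, FIX 22's exit, consume the bits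
      .3  AtLinear     → AtExit       linear search (FIX 16), match arms, no-match error
      .4  AtExit       → Returned     eax := r12d, epilogue
      COMPOSITION      Claim1 → Claim2 → Claim3 → Claim4 → the function's `Calls`

  Steady stack pointer: `e.rsp − 88` (six pushes, `sub rsp, 28H`). Slots: `[rsp+8]` = `e.rsp − 80` = f; `[rsp+10H]` = `e.rsp − 72` =
  c.codewords (qword, linear path; its low dword is overwritten with f.acc on the binary path); `[rsp+18H]` = `e.rsp − 64` =
  c.entries (dword, linear path; overwritten with `code` on the binary path); `[rsp+1CH]` = `e.rsp − 60`. rbp = c.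
-/
import Vorbis.Spec.Codebook
namespace Vorbis.Spec.ScalarRaw
open X86 X86.User Asan

/-- **What holds at every cut point of codebook_decode_scalar_raw after prep_huffman** (entered at `e`): the frame facts, the
precondition at the entry state, and — in the CURRENT memory — `Bits f` with μ not increased (`reader`), `CodebookOK c`, and the
separation of `*f` from the book. -/
structure Common (others : List Obj) (frames : List (Nat × FrameLayout)) (Blk : Block → Prop) (len : Nat) (u₀ : State)
    (ret : Word) (e v : State) : Prop where
  mid : Mid u₀ (codebook_decode_scalar_raw.spec others frames Blk len) L.codebook_decode_scalar_raw.entry ret e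
    (e.reg .rsp - 88) v
  pre : BookPre others frames Blk len e
  reader : ReaderPost Blk len e.mem v.mem (e.reg .rdi).toNat
  cb : CodebookOK Blk v.mem (e.reg .rsi).toNat
  apart : BookApart v.mem (e.reg .rdi).toNat (e.reg .rsi).toNat

/-- **10D62EH, the entry of the binary search** (CONTRACTS: "rbp = c, [rsp+0x8] = f, sorted_codewords ≠ NULL (⇒ se ≥ 1);
Bits f; CodebookOK c"). -/
structure AtBinary (others : List Obj) (frames : List (Nat × FrameLayout)) (Blk : Block → Prop) (len : Nat) (u₀ : State)
    (ret : Word) (e v : State) : Prop where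
  rip : v.rip = L.codebook_decode_scalar_raw.cut2
  common : Common others frames Blk len u₀ ret e v
  c : v.reg .rbp = e.reg .rsi
  f : UInt64.ofNat (v.mem.readLE (e.reg .rsp - 80) 8) = e.reg .rdi
  sorted_ne : Codebook.sorted_codewords v.mem (e.reg .rsi).toNat ≠ 0

/-- **10D8A5H, the entry of the linear search** (CONTRACTS: "rbp = c, [rsp+0x8] = f, [rsp+0x10] = c.codewords ≠ NULL
(⇒ sparse = 0), [rsp+0x18] = c.entries; Bits f; K3n"). -/
structure AtLinear (others : List Obj) (frames : List (Nat × FrameLayout)) (Blk : Block → Prop) (len : Nat) (u₀ : State)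
    (ret : Word) (e v : State) : Prop where
  rip : v.rip = L.codebook_decode_scalar_raw.cut7
  common : Common others frames Blk len u₀ ret e v
  c : v.reg .rbp = e.reg .rsi
  f : UInt64.ofNat (v.mem.readLE (e.reg .rsp - 80) 8) = e.reg .rdi
  codewords : v.mem.readLE (e.reg .rsp - 72) 8 = Codebook.codewords v.mem (e.reg .rsi).toNat
  codewords_ne : Codebook.codewords v.mem (e.reg .rsi).toNat ≠ 0
  entries : v.mem.readLE (e.reg .rsp - 64) 4 = (Codebook.entries v.mem (e.reg .rsi).toNat).toNat

/-- **10D775H, the exit join** (CONTRACTS: "r12d = result ∈ {−1} ∪ [0, N(c)); Bits f"). -/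
structure AtExit (others : List Obj) (frames : List (Nat × FrameLayout)) (Blk : Block → Prop) (len : Nat) (u₀ : State)
    (ret : Word) (e v : State) : Prop where
  rip : v.rip = L.codebook_decode_scalar_raw.cut5
  mid : Mid u₀ (codebook_decode_scalar_raw.spec others frames Blk len) L.codebook_decode_scalar_raw.entry ret e
    (e.reg .rsp - 88) v
  reader : ReaderPost Blk len e.mem v.mem (e.reg .rdi).toNat
  hi : (v.reg .r12).toNat < 2 ^ 32
  result : DecodeRawResult e.mem (e.reg .rsi).toNat (argInt (v.reg .r12))

/-- **Segment .1** (10D5C0H – 10D628H + 10D6ACH – 10D6DAH; C lines 1684 – 1693): prologue, prep_huffman, the both-NULL test, the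
path choice by POINTER tests only (`al := entries > 8 ? sorted_codewords ≠ NULL : codewords = NULL`). -/
def Claim1 (Lay : Layout) (μ : Microarch) (u₀ : State) : Prop :=
  ∀ (others : List Obj) (frames : List (Nat × FrameLayout)) (Blk : Block → Prop) (len : Nat) (ret : Word) (e : State),
    AtEntry (conv u₀) L.codebook_decode_scalar_raw.entry (codebook_decode_scalar_raw.spec others frames Blk len).frame ret e →
    BookPre others frames Blk len e →
    ReachVia Lay μ WayInv e (fun v =>
      AtBinary others frames Blk len u₀ ret e v ∨ AtLinear others frames Blk len u₀ ret e v ∨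
      AtExit others frames Blk len u₀ ret e v)

/-- **Segment .2** (10D62EH – 10D6AAH + 10D6DFH – 10D76EH + 10D787H – 10D7BFH; C lines 1695 – 1719): the binary search (loop 1698:
BS, measure `n`), `x = sorted_values[x]` for a dense book (K4c), `len = codeword_lengths[x]`, FIX 22's `len = 255` exit, consume the
bits or `valid_bits := 0`. -/
def Claim2 (Lay : Layout) (μ : Microarch) (u₀ : State) : Prop :=
  ∀ (others : List Obj) (frames : List (Nat × FrameLayout)) (Blk : Block → Prop) (len : Nat) (ret : Word) (e u : State),
    AtBinary others frames Blk len u₀ ret e u →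
    ReachVia Lay μ WayInv u (fun v => AtExit others frames Blk len u₀ ret e v)

/-- **Segment .3** (10D7C1H – 10D8DEH; C lines 1724 – 1739): the linear search (loop 1724, measure `entries − i`; FIX 16), the
match arms, the no-match `error`. -/
def Claim3 (Lay : Layout) (μ : Microarch) (u₀ : State) : Prop :=
  ∀ (others : List Obj) (frames : List (Nat × FrameLayout)) (Blk : Block → Prop) (len : Nat) (ret : Word) (e u : State),
    AtLinear others frames Blk len u₀ ret e u →
    ReachVia Lay μ WayInv u (fun v => AtExit others frames Blk len u₀ ret e v)

/-- **Segment .4** (10D775H – 10D786H; C line 1740): `eax := r12d`, the epilogue. -/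
def Claim4 (Lay : Layout) (μ : Microarch) (u₀ : State) : Prop :=
  ∀ (others : List Obj) (frames : List (Nat × FrameLayout)) (Blk : Block → Prop) (len : Nat) (ret : Word) (e u : State),
    AtExit others frames Blk len u₀ ret e u →
    ReachVia Lay μ WayInv u
      (Returned (conv u₀) (codebook_decode_scalar_raw.spec others frames Blk len) e ret)

end Vorbis.Spec.ScalarRaw
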